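-- pv_equiv track=rewrite | github.com/DongilMin/Programmers | 프로그래머스/2/138476. 귤 고르기/귤 고르기.py | solution
-- ===== SOURCE A (Python) =====
-- from collections import Counter
--
-- def solution(k, tangerine):
--     counts = Counter(tangerine)
--
--     sorted_counts = sorted(counts.values(), reverse=True)
--
--     box_count = 0  # 상자에 담은 귤의 총 개수
--     type_count = 0 # 귤의 종류 수
--
--     # 3. 개수가 많은 순서대로 상자를 채웁니다.
--     for count in sorted_counts:
--         box_count += count
--         type_count += 1
--
--         # 상자에 담은 귤의 개수가 k 이상이 되면 멈춥니다.
--         if box_count >= k: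
--             break
--
--     return type_count
-- ===== SOURCE B (Python) =====
-- def solution(k, tangerine):
--     counts = {}
--     for t in tangerine:
--         counts[t] = counts.get(t, 0) + 1
--     n = len(tangerine)
--     buckets = [0] * (n + 1)
--     for c in counts.values():
--         buckets[c] += 1
--     box_count = 0
--     type_count = 0
--     for f in range(n, 0, -1):
--         for _ in range(buckets[f]):
--             box_count += f
--             type_count += 1
--             if box_count >= k:
--                 return type_count
--     return type_count
-- ===== Notes on version B (the rewrite author's own statement) =====
-- stated objective: alternative
-- what changed: Replaces the comparison sort of the frequency values by a counting/bucket pass over frequencies (bounded by len(tangerine)) and fills the box by walking the buckets from the largest frequency down; asymptotically O(n) but not measurably faster in CPython, where Counter+sorted run in C.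
import Mathlib
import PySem

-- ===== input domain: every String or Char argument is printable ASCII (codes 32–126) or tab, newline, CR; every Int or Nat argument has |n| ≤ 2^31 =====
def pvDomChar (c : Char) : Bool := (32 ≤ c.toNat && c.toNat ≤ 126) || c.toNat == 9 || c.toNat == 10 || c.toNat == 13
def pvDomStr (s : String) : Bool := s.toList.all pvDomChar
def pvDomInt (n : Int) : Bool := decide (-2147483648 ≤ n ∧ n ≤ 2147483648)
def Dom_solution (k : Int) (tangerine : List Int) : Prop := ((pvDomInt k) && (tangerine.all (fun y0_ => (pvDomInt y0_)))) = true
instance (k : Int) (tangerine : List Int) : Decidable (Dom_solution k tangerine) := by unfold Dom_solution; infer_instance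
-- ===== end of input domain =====

-- B replaces A's comparison sort of the frequency values by a counting/bucket pass over frequencies (bounded by n), walking the buckets from the largest frequency down (alternative algorithm).

-- ===== PORT A =====
-- A's greedy loop over the descending-sorted counts, with break
def solutionLoopA (k : Int) : List Int → Int → Int → Int
  | [], _, type_count => type_count
  | c :: rest, box_count, type_count =>
      let box_count := box_count + c
      let type_count := type_count + 1
      if box_count ≥ k then type_count else solutionLoopA k rest box_count type_count

def solution (k : Int) (tangerine : List Int) : Int :=
  let counts := PySem.Dict.counter tangerine
  let sorted_counts := PySem.List.sorted counts.values (fun x => x) true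
  solutionLoopA k sorted_counts 0 0

-- ===== PORT B =====
-- inner loop: for _ in range(m): box+=f; t+=1; if box>=k: return t  (inr = early return)
def innerB (k f : Int) : Nat → Int → Int → (Int × Int) ⊕ Int
  | 0, box_count, type_count => .inl (box_count, type_count)
  | m + 1, box_count, type_count =>
      let box_count := box_count + f
      let type_count := type_count + 1
      if box_count ≥ k then .inr type_count else innerB k f m box_count type_count

-- outer loop: for f in range(n, 0, -1)
def outerB (k : Int) (buckets : List Int) : Nat → Int → Int → Int
  | 0, _, type_count => type_count
  | f + 1, box_count, type_count =>
      match innerB k ((f : Int) + 1) (PySem.List.pyGetD buckets ((f : Int) + 1) 0).toNat box_count type_count with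
      | .inr type_count => type_count
      | .inl (box_count, type_count) => outerB k buckets f box_count type_count

def solution_alt (k : Int) (tangerine : List Int) : Int :=
  let counts := tangerine.foldl (fun d t => d.insert t (d.getD t 0 + 1)) PySem.Dict.empty
  let n := tangerine.length
  let buckets := counts.values.foldl
      (fun b c => PySem.List.pySetD b c (PySem.List.pyGetD b c 0 + 1)) (List.replicate (n + 1) (0 : Int))
  outerB k buckets n 0 0

-- ===== PRECONDITION & SPEC =====
def Spec_solution (k : Int) (tangerine : List Int) (out : Int) : Prop := out = solution_alt k tangerine
instance (k : Int) (tangerine : List Int) (out : Int) : Decidable (Spec_solution k tangerine out) := by unfold Spec_solution; infer_instance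

-- ===== CLAIM (what is proved, stated in full; the proofs are below) =====
def Claim_equal_solution : Prop := ∀ (k : Int) (tangerine : List Int), Dom_solution k tangerine → Spec_solution k tangerine (solution k tangerine)

-- ===== LEMMAS AND PROOFS =====

-- expansion of the buckets from f down to 1 into the explicit descending list of counts
def expand (buckets : List Int) : Nat → List Int
  | 0 => []
  | f + 1 => List.replicate (PySem.List.pyGetD buckets ((f : Int) + 1) 0).toNat ((f : Int) + 1) ++ expand buckets f

-- inner loop = A's loop on a replicate block
theorem innerB_spec (k f : Int) (m : Nat) (box t : Int) (rest : List Int) :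
    solutionLoopA k (List.replicate m f ++ rest) box t =
      (match innerB k f m box t with
        | .inr t' => t'
        | .inl (box', t') => solutionLoopA k rest box' t') := by
  induction m generalizing box t with
  | zero => simp [innerB]
  | succ m ih =>
      simp only [List.replicate_succ, List.cons_append, solutionLoopA, innerB]
      split_ifs with h
      · rfl
      · exact ih _ _

-- outer loop = A's loop on the expansion
theorem outerB_spec (k : Int) (buckets : List Int) (f : Nat) (box t : Int) :
    outerB k buckets f box t = solutionLoopA k (expand buckets f) box t := by
  induction f generalizing box t with
  | zero => simp [outerB, expand, solutionLoopA]
  | succ f ih =>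
      rw [expand, innerB_spec, outerB]
      cases innerB k ((f : Int) + 1) (PySem.List.pyGetD buckets ((f : Int) + 1) 0).toNat box t with
      | inl p => exact ih p.1 p.2
      | inr t' => rfl

theorem mem_expand_le (buckets : List Int) (f : Nat) :
    ∀ x ∈ expand buckets f, x ≤ (f : Int) := by
  induction f with
  | zero => simp [expand]
  | succ f ih =>
      intro x hx
      rw [expand, List.mem_append] at hx
      rcases hx with h | h
      · have := List.eq_of_mem_replicate h; omega
      · have := ih x h; omega

theorem expand_pairwise (buckets : List Int) (f : Nat) :
    (expand buckets f).Pairwise (fun a b => b ≤ a) := by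
  induction f with
  | zero => simp [expand]
  | succ f ih =>
      rw [expand]
      refine List.pairwise_append.mpr ⟨?_, ih, ?_⟩
      · exact List.pairwise_replicate.mpr (Or.inr (le_refl _))
      · intro a ha b hb
        have h1 := List.eq_of_mem_replicate ha
        have h2 := mem_expand_le buckets f b hb
        omega

theorem count_expand (buckets : List Int) (f : Nat) (v : Int) :
    (expand buckets f).count v =
      if 1 ≤ v ∧ v ≤ (f : Int) then (PySem.List.pyGetD buckets v 0).toNat else 0 := by
  induction f with
  | zero => simp only [expand, List.count_nil]; rw [if_neg (by omega)]
  | succ f ih =>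
      rw [expand, List.count_append, ih, List.count_replicate]
      by_cases hv : v = (f : Int) + 1
      · subst hv
        rw [if_pos (by simp), if_neg (by omega), if_pos (by constructor <;> omega)]
        omega
      · rw [if_neg (by simpa using fun h => hv h.symm)]
        by_cases h1 : 1 ≤ v ∧ v ≤ (f : Int)
        · rw [if_pos h1, if_pos ⟨h1.1, by omega⟩]; omega
        · rw [if_neg h1, if_neg (by omega)]

-- the bucket-building fold counts occurrences, for in-range indices
theorem buckets_getD (vals : List Int) (b : List Int) (j : Int)
    (hb : ∀ c ∈ vals, 0 ≤ c ∧ c < (b.length : Int)) (hj : 0 ≤ j) :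
    PySem.List.pyGetD (vals.foldl (fun b c => PySem.List.pySetD b c (PySem.List.pyGetD b c 0 + 1)) b) j 0 =
      PySem.List.pyGetD b j 0 + vals.count j := by
  induction vals generalizing b with
  | nil => simp
  | cons c rest ih =>
      simp only [List.foldl_cons, List.count_cons]
      obtain ⟨hc0, hclt⟩ := hb c (by simp)
      have hcn : c = ((c.toNat : Nat) : Int) := by omega
      have hlen : (PySem.List.pySetD b c (PySem.List.pyGetD b c 0 + 1)).length = b.length := by
        rw [hcn, PySem.List.pySetD_natCast]; simp
      rw [ih _ (fun x hx => by rw [hlen]; exact hb x (List.mem_cons_of_mem _ hx))]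
      have hget : PySem.List.pyGetD (PySem.List.pySetD b c (PySem.List.pyGetD b c 0 + 1)) j 0 =
          if j.toNat = c.toNat then PySem.List.pyGetD b c 0 + 1 else PySem.List.pyGetD b j 0 := by
        conv_lhs => rw [hcn, show j = ((j.toNat : Nat) : Int) from by omega]
        rw [PySem.List.pyGetD_pySetD_natCast _ _ _ _ _ (by omega)]
        rw [← hcn, ← show j = ((j.toNat : Nat) : Int) from by omega]
      rw [hget]
      by_cases hjc : j = c
      · subst hjc
        rw [if_pos rfl]
        simp
        omega
      · rw [if_neg (by omega)]
        have hcj : (c == j) = false := by simpa using fun h => hjc h.symm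
        simp [hcj]

theorem solution_eq (k : Int) (tangerine : List Int) :
    solution k tangerine = solution_alt k tangerine := by
  simp only [solution, solution_alt, PySem.Dict.foldl_insert_getD_add_one_eq_counter]
  set vals := (PySem.Dict.counter tangerine).values with hvals
  set n := tangerine.length with hn
  set buckets := vals.foldl
      (fun b c => PySem.List.pySetD b c (PySem.List.pyGetD b c 0 + 1)) (List.replicate (n + 1) (0 : Int))
    with hbuckets
  have hmem : ∀ c ∈ vals, 1 ≤ c ∧ c ≤ (n : Int) := by
    intro c hc
    rw [hvals, PySem.Dict.values_eq_map_keys _ (PySem.Dict.nodup_keys_counter tangerine) 0] at hc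
    simp only [PySem.Dict.keys_counter, PySem.Dict.getD_counter, List.mem_map] at hc
    obtain ⟨x, hx, rfl⟩ := hc
    have hx' : x ∈ tangerine := (PySem.Set.mem_ofList _ _).mp hx
    have h1 : 0 < tangerine.count x := List.count_pos_iff.mpr hx'
    have h2 : tangerine.count x ≤ n := List.count_le_length
    omega
  have hbg : ∀ j : Int, 0 ≤ j → PySem.List.pyGetD buckets j 0 = (vals.count j : Int) := by
    intro j hj
    rw [hbuckets, buckets_getD vals _ j
      (fun c hc => ⟨by have := (hmem c hc).1; omega, by have := (hmem c hc).2; simp; omega⟩) hj]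
    have hz : PySem.List.pyGetD (List.replicate (n + 1) (0 : Int)) j 0 = 0 := by
      rw [show j = ((j.toNat : Nat) : Int) from by omega, PySem.List.pyGetD_natCast]
      simp [List.getD]
    rw [hz]; omega
  have hperm : (expand buckets n).Perm vals := by
    rw [List.perm_iff_count]
    intro v
    rw [count_expand]
    by_cases hv : 1 ≤ v ∧ v ≤ (n : Int)
    · rw [if_pos hv, hbg v (by omega)]; simp
    · rw [if_neg hv]
      symm
      rw [List.count_eq_zero]
      intro h
      exact hv ⟨(hmem v h).1, (hmem v h).2⟩
  have hsorted_eq : expand buckets n = PySem.List.sorted vals (fun x => x) true := by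
    exact List.Perm.eq_of_pairwise (fun a b _ _ h1 h2 => le_antisymm h2 h1)
      (expand_pairwise buckets n) (PySem.List.sorted_pairwise_rev vals (fun x => x))
      (hperm.trans (PySem.List.sorted_perm vals (fun x => x) true).symm)
  rw [outerB_spec, hsorted_eq]

-- ===== VERDICT (by name: the statement is the Claim_ definition above) =====
theorem solution_spec : Claim_equal_solution := by
  intro k tangerine _
  unfold Spec_solution
  exact solution_eq k tangerine
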